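-- pv_equiv track=rewrite | github.com/MrSingh710/Programs | College Python/Week4/07.py | find_substring_ignore_case
-- ===== SOURCE A (Python) =====
-- def find_substring_ignore_case(string, substring):
--     string_lower = string.lower()
--     substring_lower = substring.lower()
--     occurrences = []
--     start = 0
--     while True:
--         start = string_lower.find(substring_lower, start)
--         if start == -1:
--             break
--         occurrences.append(start)
--         start += len(substring_lower)
--     return occurrences
-- ===== SOURCE B (Python) =====
-- def find_substring_ignore_case(string, substring):
--     s = string.lower()
--     p = substring.lower()
--     m = len(p)
--     matches = [i for i in range(len(s) - m + 1) if s[i:i+m] == p]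
--     occurrences = []
--     last_end = 0
--     for i in matches:
--         if last_end <= i:
--             occurrences.append(i)
--             last_end = i + m
--     return occurrences
-- ===== Notes on version B (the rewrite author's own statement) =====
-- stated objective: alternative
-- what changed: Instead of repeatedly calling str.find and jumping past each hit, B first collects every (possibly overlapping) match position with one slice-comparison scan and then greedily keeps the non-overlapping ones in a second pass; Pre_ excludes the empty substring, on which A loops forever.
-- outside the precondition, e.g. on find_substring_ignore_case('ab', ''): A does not finish within the time limit, B returns [0, 1, 2]
import Mathlib
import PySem

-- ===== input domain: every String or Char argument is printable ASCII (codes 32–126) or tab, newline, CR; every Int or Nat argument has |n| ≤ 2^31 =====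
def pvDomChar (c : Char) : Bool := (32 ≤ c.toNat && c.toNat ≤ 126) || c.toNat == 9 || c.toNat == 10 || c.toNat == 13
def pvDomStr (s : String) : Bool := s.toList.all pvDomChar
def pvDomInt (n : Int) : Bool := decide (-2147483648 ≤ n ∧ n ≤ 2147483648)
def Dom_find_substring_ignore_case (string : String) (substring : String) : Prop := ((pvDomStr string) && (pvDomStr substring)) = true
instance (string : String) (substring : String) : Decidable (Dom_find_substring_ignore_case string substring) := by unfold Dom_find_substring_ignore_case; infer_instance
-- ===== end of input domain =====

-- B replaces A's repeated str.find-and-jump loop by a two-phase algorithm (collect all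
-- candidate positions, then greedily keep the non-overlapping ones); equality of the
-- return values is proved for every nonempty substring (objective: alternative).

-- ===== PORT A =====
-- A's 'while True' loop; fuel only makes it total (with a nonempty pattern the loop runs
-- at most s.length + 1 times, which the proof establishes; the computation is unchanged).
def pvLoopA (s p : List Char) (occ : List Int) (start : Int) : Nat → List Int
  | 0 => occ
  | fuel + 1 =>
    let r := PySem.Chars.findFrom s p start
    if r = -1 then occ
    else pvLoopA s p (occ ++ [r]) (r + (p.length : Int)) fuel

def find_substring_ignore_case (string : String) (substring : String) : List Int :=
  let string_lower := PySem.Chars.lower string.toList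
  let substring_lower := PySem.Chars.lower substring.toList
  pvLoopA string_lower substring_lower [] 0 (string_lower.length + 1)

-- ===== PORT B =====
def find_substring_ignore_case_alt (string : String) (substring : String) : List Int :=
  let s := PySem.Chars.lower string.toList
  let p := PySem.Chars.lower substring.toList
  let m : Int := p.length
  let cands := (PySem.List.pyRange 0 ((s.length : Int) - m + 1)).filter
    (fun i => PySem.List.slice s (some i) (some (i + m)) == p)
  (cands.foldl
    (fun st i => if st.2 ≤ i then (st.1 ++ [i], i + m) else st)
    (([] : List Int), (0 : Int))).1

-- ===== PRECONDITION & SPEC =====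
-- Pre_ excludes only the empty substring: there A's 'start += 0' loop never terminates
-- (find keeps succeeding at the same position), so A returns on no such input.
def Pre_find_substring_ignore_case (string : String) (substring : String) : Prop := substring ≠ ""
instance (string : String) (substring : String) : Decidable (Pre_find_substring_ignore_case string substring) := by unfold Pre_find_substring_ignore_case; infer_instance
def pvWitness_find_substring_ignore_case : String × String := ("abcABC", "Bc")

def Spec_find_substring_ignore_case (string : String) (substring : String) (out : List Int) : Prop := out = find_substring_ignore_case_alt string substring
instance (string : String) (substring : String) (out : List Int) : Decidable (Spec_find_substring_ignore_case string substring out) := by unfold Spec_find_substring_ignore_case; infer_instance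

-- ===== CLAIM (what is proved, stated in full; the proofs are below) =====
def Claim_equal_find_substring_ignore_case : Prop := ∀ (string : String) (substring : String), Dom_find_substring_ignore_case string substring → Pre_find_substring_ignore_case string substring → Spec_find_substring_ignore_case string substring (find_substring_ignore_case string substring)

-- ===== LEMMAS AND PROOFS =====

-- B's greedy step, named for the proofs (definitionally the lambda in the port of B)
def pvStep (m : Int) (st : List Int × Int) (i : Int) : List Int × Int :=
  if st.2 ≤ i then (st.1 ++ [i], i + m) else st

-- the slice test of B picks out exactly the prefix-match positions
theorem pvQ_iff (s p : List Char) (i : Int) (h0 : 0 ≤ i) :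
    ((PySem.List.slice s (some i) (some (i + (p.length : Int))) == p) = true) ↔
      p <+: s.drop i.toNat := by
  obtain ⟨n, rfl⟩ : ∃ n : Nat, i = (n : Int) := ⟨i.toNat, by omega⟩
  rw [show (n : Int) + (p.length : Int) = ((n + p.length : Nat) : Int) by push_cast; ring,
    PySem.List.slice_natCast, show n + p.length - n = p.length by omega,
    Int.toNat_natCast, beq_iff_eq, List.prefix_iff_eq_take]
  exact eq_comm

-- candidates below the current threshold are skipped by the greedy fold
theorem pvSkipPrefix (m : Int) : ∀ (l1 l2 occ : List Int) (t : Int),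
    (∀ j ∈ l1, j < t) →
    (l1 ++ l2).foldl (pvStep m) (occ, t) = l2.foldl (pvStep m) (occ, t) := by
  intro l1
  induction l1 with
  | nil => intro l2 occ t _; rfl
  | cons j tl ih =>
    intro l2 occ t h
    have hj : j < t := h j (by simp)
    rw [List.cons_append, List.foldl_cons,
      show pvStep m (occ, t) j = (occ, t) by simp [pvStep, show ¬ t ≤ j by omega]]
    exact ih l2 occ t (fun x hx => h x (by simp [hx]))

-- a match at position j ≥ k makes p an infix of s.drop k
theorem pvInfix_of_prefix_drop (s p : List Char) (k j : Nat) (hk : k ≤ j)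
    (h : p <+: s.drop j) : p <:+: s.drop k := by
  have hd : List.drop (j - k) (List.drop k s) = List.drop j s := by
    rw [List.drop_drop]; congr 1; omega
  rw [← hd] at h
  exact h.isInfix.trans (List.drop_suffix _ _).isInfix

-- main correspondence: A's find-and-jump loop from start k computes B's greedy fold
-- over the candidate positions ≥ k, from threshold k
theorem pvMain (s p : List Char) (hp : p ≠ []) : ∀ (fuel k : Nat) (occ : List Int),
    k ≤ s.length → s.length + 1 - k ≤ fuel →
    pvLoopA s p occ (k : Int) fuel
      = (((PySem.List.pyRange (k : Int) ((s.length : Int) - (p.length : Int) + 1)).filter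
            (fun i => PySem.List.slice s (some i) (some (i + (p.length : Int))) == p)).foldl
           (pvStep (p.length : Int)) (occ, (k : Int))).1 := by
  intro fuel
  induction fuel with
  | zero => intro k occ hk hf; exact absurd hf (by omega)
  | succ f ih =>
    intro k occ hk hf
    have hm1 : 1 ≤ p.length := List.length_pos_iff.mpr hp
    by_cases hr : PySem.Chars.findFrom s p (k : Int) = -1
    · -- no further occurrence: A stops; B's candidate list from k is empty
      have hnone : ¬ p <:+: List.drop k s :=
        (PySem.Chars.findFrom_natCast_eq_neg_one_iff s p k hk).mp hr
      have hfil : (PySem.List.pyRange (k : Int) ((s.length : Int) - (p.length : Int) + 1)).filter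
          (fun i => PySem.List.slice s (some i) (some (i + (p.length : Int))) == p) = [] := by
        rw [List.filter_eq_nil_iff]
        intro i hi hq
        rw [PySem.List.mem_pyRange_one] at hi
        have h0 : (0 : Int) ≤ i := le_trans (Int.natCast_nonneg k) hi.1
        have hpre := (pvQ_iff s p i h0).mp hq
        exact hnone (pvInfix_of_prefix_drop s p k i.toNat (by omega) hpre)
      rw [hfil]
      simp [pvLoopA, hr]
    · -- an occurrence r: A records it and jumps to r + m; B's candidate list from k
      -- starts with r, and the candidates strictly between r and r + m are skipped
      obtain ⟨hkr, hpre, hmin⟩ := PySem.Chars.findFrom_natCast_spec s p k hk hr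
      set r := PySem.Chars.findFrom s p (k : Int) with hrdef
      have hr0 : (0 : Int) ≤ r := le_trans (Int.natCast_nonneg k) hkr
      have hrn : r = ((r.toNat : Nat) : Int) := by omega
      have hrm : r.toNat + p.length ≤ s.length := by
        have hl := hpre.length_le
        simp only [List.length_drop] at hl
        omega
      have hN : r < (s.length : Int) - (p.length : Int) + 1 := by omega
      have hqr : (PySem.List.slice s (some r) (some (r + (p.length : Int))) == p) = true := by
        rw [pvQ_iff s p r hr0]; exact hpre
      have hsplit : (PySem.List.pyRange (k : Int) ((s.length : Int) - (p.length : Int) + 1)).filter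
            (fun i => PySem.List.slice s (some i) (some (i + (p.length : Int))) == p)
          = r :: (PySem.List.pyRange (r + 1) ((s.length : Int) - (p.length : Int) + 1)).filter
            (fun i => PySem.List.slice s (some i) (some (i + (p.length : Int))) == p) := by
        rw [PySem.List.pyRange_one_append (k : Int) r ((s.length : Int) - (p.length : Int) + 1)
            hkr (le_of_lt hN), List.filter_append]
        have h1 : (PySem.List.pyRange (k : Int) r).filter
            (fun i => PySem.List.slice s (some i) (some (i + (p.length : Int))) == p) = [] := by
          rw [List.filter_eq_nil_iff]
          intro i hi hq
          rw [PySem.List.mem_pyRange_one] at hi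
          have h0 : (0 : Int) ≤ i := le_trans (Int.natCast_nonneg k) hi.1
          have hpi := (pvQ_iff s p i h0).mp hq
          exact hmin i.toNat (by omega) (by omega) hpi
        rw [h1, List.nil_append, PySem.List.pyRange_one_cons hN, List.filter_cons, hqr, if_pos rfl]
      rw [hsplit, List.foldl_cons,
        show pvStep ((p.length : Int)) (occ, (k : Int)) r = (occ ++ [r], r + (p.length : Int)) by
          simp [pvStep, hkr],
        show pvLoopA s p occ (k : Int) (f + 1)
            = pvLoopA s p (occ ++ [r]) (r + (p.length : Int)) f by
          rw [pvLoopA, ← hrdef]; simp [hr],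
        show r + (p.length : Int) = ((r.toNat + p.length : Nat) : Int) by push_cast; omega,
        ih (r.toNat + p.length) (occ ++ [r]) hrm (by omega)]
      -- both sides fold from threshold r + m; the candidates in (r, r + m) are skipped
      by_cases hTN : ((r.toNat + p.length : Nat) : Int) ≤ (s.length : Int) - (p.length : Int) + 1
      · have hsplit2 : (PySem.List.pyRange (r + 1) ((s.length : Int) - (p.length : Int) + 1)).filter
              (fun i => PySem.List.slice s (some i) (some (i + (p.length : Int))) == p)
            = (PySem.List.pyRange (r + 1) ((r.toNat + p.length : Nat) : Int)).filter
                (fun i => PySem.List.slice s (some i) (some (i + (p.length : Int))) == p)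
              ++ (PySem.List.pyRange ((r.toNat + p.length : Nat) : Int) ((s.length : Int) - (p.length : Int) + 1)).filter
                (fun i => PySem.List.slice s (some i) (some (i + (p.length : Int))) == p) := by
          rw [← List.filter_append,
            ← PySem.List.pyRange_one_append (r + 1) ((r.toNat + p.length : Nat) : Int)
              ((s.length : Int) - (p.length : Int) + 1) (by omega) hTN]
        rw [hsplit2, pvSkipPrefix]
        intro j hj
        have := (List.mem_filter.mp hj).1
        rw [PySem.List.mem_pyRange_one] at this
        omega
      · have he : PySem.List.pyRange ((r.toNat + p.length : Nat) : Int)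
            ((s.length : Int) - (p.length : Int) + 1) = [] :=
          PySem.List.pyRange_one_eq_nil (by omega)
        rw [he, List.filter_nil, ← List.append_nil ((PySem.List.pyRange (r + 1) _).filter _),
          pvSkipPrefix]
        intro j hj
        have := (List.mem_filter.mp hj).1
        rw [PySem.List.mem_pyRange_one] at this
        omega

-- ===== VERDICT (by name: the statement is the Claim_ definition above) =====
theorem find_substring_ignore_case_spec : Claim_equal_find_substring_ignore_case := by
  intro string substring _hdom hpre
  unfold Spec_find_substring_ignore_case find_substring_ignore_case find_substring_ignore_case_alt
  have hp : PySem.Chars.lower substring.toList ≠ [] := by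
    intro h
    apply hpre
    have hlen := congrArg List.length h
    simp [PySem.Chars.lower] at hlen
    exact hlen
  have h := pvMain (PySem.Chars.lower string.toList) (PySem.Chars.lower substring.toList) hp
    ((PySem.Chars.lower string.toList).length + 1) 0 [] (by omega) (by omega)
  simpa [pvStep] using h
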